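-- pv_equiv track=rewrite | github.com/mchouza/mchouza | misc/bounded_iteration/possible_examples.py | reverse_bits_n
-- ===== SOURCE A (Python) =====
-- def identity(a):
--     return a
--
-- def add(a, b):
--     c = identity(a)
--     for i in range(b):
--         c += 1
--     return c
--
-- def shl_one(a):
--     return add(a, a)
--
-- def shr_one(a):
--     c = 0
--     for i in range(a):
--         if c == a:
--             return i
--         c += 1
--         if c == a:
--             return i
--         c += 1
--     return 0
--
-- def is_even(a):
--     o = 1
--     z = 0
--     b = shr_one(a)
--     b = shl_one(b)
--     if b == a:
--         return o
--     return z
--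
-- def is_odd(a):
--     o = 1
--     z = 0
--     e = is_even(a)
--     if e == z:
--         return o
--     return z
--
-- def reverse_bits_n(a, n):
--     r = 0
--     o = 0
--     o += 1
--     for i in range(n):
--         r = shl_one(r)
--         ao = is_odd(a)
--         if ao == o:
--             r += 1
--         a = shr_one(a)
--     return r
-- ===== SOURCE B (Python) =====
-- def reverse_bits_n(a, n):
--     r = 0
--     for _ in range(n):
--         r = 2 * r + a % 2
--         a //= 2
--     return r
-- ===== Notes on version B (the rewrite author's own statement) =====
-- stated objective: faster
-- what changed: B extracts each bit with real arithmetic (a % 2, a //= 2, r doubling) in O(1) per bit, replacing A's tower of increment-only helpers (shr_one/shl_one/is_odd) that cost O(a) per bit; intended as asymptotically faster - in a timing run A timed out at the largest sizes where B returned, so no ratio could be measured.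
-- outside the precondition, e.g. on reverse_bits_n(-1, 2): A returns 2, B returns 3
import Mathlib
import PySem

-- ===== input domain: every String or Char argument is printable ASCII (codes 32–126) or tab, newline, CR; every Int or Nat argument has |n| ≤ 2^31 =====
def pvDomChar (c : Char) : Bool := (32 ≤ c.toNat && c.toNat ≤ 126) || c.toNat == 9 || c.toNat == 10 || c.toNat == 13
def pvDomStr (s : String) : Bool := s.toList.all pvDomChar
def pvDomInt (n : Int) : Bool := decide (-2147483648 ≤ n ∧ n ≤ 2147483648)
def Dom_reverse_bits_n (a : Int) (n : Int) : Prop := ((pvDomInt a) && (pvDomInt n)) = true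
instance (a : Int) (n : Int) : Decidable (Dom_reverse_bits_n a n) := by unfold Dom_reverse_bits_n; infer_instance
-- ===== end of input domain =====

-- B replaces A's increment-only helper tower (O(a) work per extracted bit) with direct
-- arithmetic bit extraction (a % 2, a //= 2); intended as asymptotically faster (the
-- timing run saw A time out where B returned, so no ratio was measured); equivalence
-- is claimed on the natural domain 0 ≤ a (Pre_ below).

-- ===== PORT A =====
def pyIdentity (a : Int) : Int := a

def pyAdd (a : Int) (b : Int) : Int :=
  (PySem.List.pyRange 0 b 1).foldl (fun c _ => c + 1) (pyIdentity a)

def shl_one (a : Int) : Int := pyAdd a a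

-- the for-loop of Python's shr_one, with its two early returns, over the range list
def shr_one_loop (a : Int) : Int → List Int → Int
  | _, [] => 0
  | c, i :: rest =>
    if c = a then i
    else
      let c := c + 1
      if c = a then i
      else shr_one_loop a (c + 1) rest

def shr_one (a : Int) : Int := shr_one_loop a 0 (PySem.List.pyRange 0 a 1)

def is_even (a : Int) : Int :=
  let o : Int := 1
  let z : Int := 0
  let b := shr_one a
  let b := shl_one b
  if b = a then o else z

def is_odd (a : Int) : Int :=
  let o : Int := 1
  let z : Int := 0
  let e := is_even a
  if e = z then o else z

def reverse_bits_n (a : Int) (n : Int) : Int :=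
  let r : Int := 0
  let o : Int := 0
  let o := o + 1
  let st := (PySem.List.pyRange 0 n 1).foldl (fun (st : Int × Int) _ =>
    let r := st.1
    let a := st.2
    let r := shl_one r
    let ao := is_odd a
    let r := if ao = o then r + 1 else r
    let a := shr_one a
    (r, a)) (r, a)
  st.1

-- ===== PORT B =====
def reverse_bits_n_alt (a : Int) (n : Int) : Int :=
  ((PySem.List.pyRange 0 n 1).foldl (fun (st : Int × Int) _ =>
    (2 * st.1 + PySem.Int.mod st.2 2, PySem.Int.floordiv st.2 2)) (0, a)).1

-- ===== PRECONDITION & SPEC =====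
-- Pre_ restricts to 0 ≤ a, the natural domain of "reverse the low n bits": on negative a,
-- A's returned value (its shr_one yields 0 on any negative input, so at most one bit is
-- seen) is an artefact of the increment-only helpers, while B follows Python's floor
-- arithmetic on negatives; A still returns there, so the excluded example is cited.
def Pre_reverse_bits_n (a : Int) (n : Int) : Prop := 0 ≤ a
instance (a : Int) (n : Int) : Decidable (Pre_reverse_bits_n a n) := by unfold Pre_reverse_bits_n; infer_instance
def pvWitness_reverse_bits_n : Int × Int := (13, 4)

def Spec_reverse_bits_n (a : Int) (n : Int) (out : Int) : Prop := out = reverse_bits_n_alt a n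
instance (a : Int) (n : Int) (out : Int) : Decidable (Spec_reverse_bits_n a n out) := by unfold Spec_reverse_bits_n; infer_instance

-- ===== CLAIM (what is proved, stated in full; the proofs are below) =====
def Claim_equal_reverse_bits_n : Prop := ∀ (a : Int) (n : Int), Dom_reverse_bits_n a n → Pre_reverse_bits_n a n → Spec_reverse_bits_n a n (reverse_bits_n a n)

-- ===== LEMMAS AND PROOFS =====

theorem foldl_succ (l : List Int) : ∀ c : Int, l.foldl (fun c _ => c + 1) c = c + l.length := by
  induction l with
  | nil => intro c; simp
  | cons x xs ih => intro c; simp [List.foldl, ih]; ring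

theorem pyAdd_eq (a b : Int) (hb : 0 ≤ b) : pyAdd a b = a + b := by
  simp [pyAdd, pyIdentity, foldl_succ, PySem.List.length_pyRange_one]
  omega

theorem shl_one_eq (a : Int) (ha : 0 ≤ a) : shl_one a = 2 * a := by
  simp [shl_one, pyAdd_eq a a ha]; ring

-- at the start of iteration i of shr_one's loop the counter c equals 2*i and the
-- remaining indices are range(i, a); from there the loop returns a // 2
theorem shr_aux (a : Int) (ha : 0 ≤ a) : ∀ (k : Nat) (i : Int), 0 ≤ i → 2 * i ≤ a →
    (a - i).toNat = k → shr_one_loop a (2 * i) (PySem.List.pyRange i a 1) = PySem.Int.floordiv a 2 := by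
  intro k
  induction k with
  | zero =>
    intro i h0 h2 hk
    have : i = 0 := by omega
    have ha0 : a = 0 := by omega
    subst this; subst ha0
    simp [PySem.List.pyRange_one_eq_nil, shr_one_loop]
  | succ k ih =>
    intro i h0 h2 hk
    have hlt : i < a := by omega
    rw [PySem.List.pyRange_one_cons hlt]
    unfold shr_one_loop
    by_cases h1 : 2 * i = a
    · simp [h1]
      omega
    · simp only [h1, if_false]
      by_cases h2' : 2 * i + 1 = a
      · simp [h2']
        omega
      · simp only [h2', if_false]
        have : 2 * i + 1 + 1 = 2 * (i + 1) := by ring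
        rw [this]
        exact ih (i + 1) (by omega) (by omega) (by omega)

theorem shr_one_eq (a : Int) (ha : 0 ≤ a) : shr_one a = PySem.Int.floordiv a 2 := by
  have := shr_aux a ha (a - 0).toNat 0 le_rfl (by omega) rfl
  simpa using this

theorem is_odd_eq (a : Int) (ha : 0 ≤ a) : is_odd a = PySem.Int.mod a 2 := by
  have hm := PySem.Int.floordiv_mul_add_mod a 2
  have h0 := PySem.Int.mod_nonneg a (b := 2) (by omega)
  have h1 := PySem.Int.mod_lt a (b := 2) (by omega)
  have hq : 0 ≤ PySem.Int.floordiv a 2 := by omega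
  simp only [is_odd, is_even, shr_one_eq a ha, shl_one_eq _ hq]
  split_ifs with h h' h' <;> omega

-- the two loop bodies agree step by step while r and a stay nonnegative
theorem fold_eq (l : List Int) : ∀ (r a : Int), 0 ≤ r → 0 ≤ a →
    l.foldl (fun (st : Int × Int) _ =>
      (if is_odd st.2 = (0 : Int) + 1 then shl_one st.1 + 1 else shl_one st.1, shr_one st.2)) (r, a)
    = l.foldl (fun (st : Int × Int) _ =>
      (2 * st.1 + PySem.Int.mod st.2 2, PySem.Int.floordiv st.2 2)) (r, a) := by
  induction l with
  | nil => intro r a _ _; rfl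
  | cons x xs ih =>
    intro r a hr ha
    have hm := PySem.Int.floordiv_mul_add_mod a 2
    have h0 := PySem.Int.mod_nonneg a (b := 2) (by omega)
    have h1 := PySem.Int.mod_lt a (b := 2) (by omega)
    have hstep : (if is_odd a = (0 : Int) + 1 then shl_one r + 1 else shl_one r, shr_one a)
        = (2 * r + PySem.Int.mod a 2, PySem.Int.floordiv a 2) := by
      rw [is_odd_eq a ha, shl_one_eq r hr, shr_one_eq a ha]
      split_ifs with h <;> simp <;> omega
    simp only [List.foldl_cons, hstep]
    exact ih _ _ (by omega) (by omega)

-- ===== VERDICT (by name: the statement is the Claim_ definition above) =====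
theorem reverse_bits_n_spec : Claim_equal_reverse_bits_n := by
  intro a n _ ha
  show reverse_bits_n a n = reverse_bits_n_alt a n
  unfold reverse_bits_n reverse_bits_n_alt
  exact congrArg Prod.fst (fold_eq _ 0 a le_rfl ha)
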